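-- pv_equiv track=rewrite | github.com/songyi1229/codetree-TILs | 241003/운행 되고 있는 시간/hours-in-service.py | find_time
-- ===== SOURCE A (Python) =====
-- def find_time(a, b, c, d):
--     check = []
--     for i in range(a, b):
--         if i not in check:
--             check.append(i)
--     for ii in range(c, d):
--         if ii not in check:
--             check.append(ii)
--
--     time = len(check)
--
--     return time
-- ===== SOURCE B (Python) =====
-- def find_time(a, b, c, d):
--     len1 = max(b - a, 0)
--     len2 = max(d - c, 0)
--     overlap = max(min(b, d) - max(a, c), 0)
--     return len1 + len2 - overlap
-- ===== Notes on version B (the rewrite author's own statement) =====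
-- stated objective: faster
-- what changed: replaced the quadratic dedup-list construction of the union of two ranges with the closed-form O(1) interval formula (b-a)+(d-c)-overlap
import Mathlib
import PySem

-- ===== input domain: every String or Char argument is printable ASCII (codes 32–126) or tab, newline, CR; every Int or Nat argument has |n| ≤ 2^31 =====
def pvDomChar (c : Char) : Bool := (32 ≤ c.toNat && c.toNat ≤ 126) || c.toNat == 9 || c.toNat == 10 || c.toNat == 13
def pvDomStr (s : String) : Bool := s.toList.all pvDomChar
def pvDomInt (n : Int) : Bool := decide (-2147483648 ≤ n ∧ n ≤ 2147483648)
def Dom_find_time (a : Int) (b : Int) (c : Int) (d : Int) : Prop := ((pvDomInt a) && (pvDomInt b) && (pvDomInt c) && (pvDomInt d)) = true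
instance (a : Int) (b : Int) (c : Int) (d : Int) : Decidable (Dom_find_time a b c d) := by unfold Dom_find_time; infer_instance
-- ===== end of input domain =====

-- B replaces A's dedup-list construction of the union of two ranges by the closed-form
-- interval formula (b-a)⁺ + (d-c)⁺ - overlap⁺ — a different, asymptotically faster algorithm.

-- ===== PORT A =====
def find_time (a : Int) (b : Int) (c : Int) (d : Int) : Int :=
  let check : List Int :=
    (PySem.List.pyRange a b 1).foldl
      (fun check i => if check.contains i then check else check ++ [i]) []
  let check : List Int :=
    (PySem.List.pyRange c d 1).foldl
      (fun check ii => if check.contains ii then check else check ++ [ii]) check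
  (check.length : Int)

-- ===== PORT B =====
def find_time_alt (a : Int) (b : Int) (c : Int) (d : Int) : Int :=
  let len1 := max (b - a) 0
  let len2 := max (d - c) 0
  let overlap := max (min b d - max a c) 0
  len1 + len2 - overlap

-- ===== PRECONDITION & SPEC =====
def Spec_find_time (a : Int) (b : Int) (c : Int) (d : Int) (out : Int) : Prop := out = find_time_alt a b c d
instance (a : Int) (b : Int) (c : Int) (d : Int) (out : Int) : Decidable (Spec_find_time a b c d out) := by unfold Spec_find_time; infer_instance

-- ===== CLAIM (what is proved, stated in full; the proofs are below) =====
def Claim_equal_find_time : Prop := ∀ (a : Int) (b : Int) (c : Int) (d : Int), Dom_find_time a b c d → Spec_find_time a b c d (find_time a b c d)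

-- ===== LEMMAS AND PROOFS =====

-- The dedup-append loop over a duplicate-free list appends exactly the fresh elements.
theorem pv_foldl_dedup (xs acc : List Int) (h : xs.Nodup) :
    xs.foldl (fun check i => if check.contains i then check else check ++ [i]) acc
      = acc ++ xs.filter (fun i => !acc.contains i) := by
  induction xs generalizing acc with
  | nil => simp
  | cons x xs ih =>
    have hx : x ∉ xs := (List.nodup_cons.mp h).1
    have hxs : xs.Nodup := (List.nodup_cons.mp h).2
    rw [List.foldl_cons, List.filter_cons]
    by_cases hmem : x ∈ acc
    · rw [if_pos (by simpa using hmem), ih _ hxs]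
      simp [hmem]
    · rw [if_neg (by simpa using hmem), ih _ hxs]
      have hfil : xs.filter (fun i => !(acc ++ [x]).contains i)
          = xs.filter (fun i => !acc.contains i) := by
        apply List.filter_congr
        intro y hy
        have hne : y ≠ x := fun hE => hx (hE ▸ hy)
        simp [hne]
      rw [hfil]
      simp [hmem, List.append_assoc]

-- Counting the elements of the duplicate-free range [c,d) that lie outside [a,b).
theorem pv_filter_len (a b c d : Int) :
    ((PySem.List.pyRange c d 1).filter
        (fun i => !(PySem.List.pyRange a b 1).contains i)).length
      = (max (d - c) 0 - max (min b d - max a c) 0).toNat := by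
  have hgen : ∀ n : Nat, ∀ c : Int, d - c ≤ n →
      ((PySem.List.pyRange c d 1).filter
          (fun i => !(PySem.List.pyRange a b 1).contains i)).length
        = (max (d - c) 0 - max (min b d - max a c) 0).toNat := by
    intro n
    induction n with
    | zero =>
      intro c hc
      rw [show PySem.List.pyRange c d 1 = [] from PySem.List.pyRange_one_eq_nil (by omega)]
      simp only [List.filter_nil, List.length_nil, Int.max_def, Int.min_def]
      split_ifs <;> omega
    | succ n ih =>
      intro c hc
      by_cases hcd : c < d
      · rw [show PySem.List.pyRange c d 1 = c :: PySem.List.pyRange (c + 1) d 1 from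
          PySem.List.pyRange_one_cons hcd]
        have hrec := ih (c + 1) (by omega)
        by_cases hin : a ≤ c ∧ c < b
        · have hcmem : (PySem.List.pyRange a b 1).contains c = true := by
            simp [PySem.List.mem_pyRange_one]; omega
          rw [List.filter_cons]
          simp only [hcmem, Bool.not_true, Bool.false_eq_true, if_false, hrec,
            Int.max_def, Int.min_def]
          split_ifs <;> omega
        · have hcmem : (PySem.List.pyRange a b 1).contains c = false := by
            simp [PySem.List.mem_pyRange_one]; omega
          rw [List.filter_cons]
          simp only [hcmem, Bool.not_false, if_true, List.length_cons, hrec,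
            Int.max_def, Int.min_def]
          split_ifs <;> omega
      · rw [show PySem.List.pyRange c d 1 = [] from PySem.List.pyRange_one_eq_nil (by omega)]
        simp only [List.filter_nil, List.length_nil, Int.max_def, Int.min_def]
        split_ifs <;> omega
  exact hgen (d - c).toNat c (by omega)

-- ===== VERDICT (by name: the statement is the Claim_ definition above) =====
theorem find_time_spec : Claim_equal_find_time := by
  intro a b c d _
  show find_time a b c d = find_time_alt a b c d
  unfold find_time find_time_alt
  have h1 := pv_foldl_dedup (PySem.List.pyRange a b 1) [] (PySem.List.nodup_pyRange_one _ _)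
  have h2 := pv_foldl_dedup (PySem.List.pyRange c d 1)
      (PySem.List.pyRange a b 1) (PySem.List.nodup_pyRange_one _ _)
  simp only [List.contains_nil, Bool.not_false, List.filter_true, List.nil_append] at h1
  simp only [h1, h2, List.length_append, PySem.List.length_pyRange_one, pv_filter_len]
  push_cast
  omega
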